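-- pv_equiv track=rewrite | github.com/Manticoree/lidco | src/lidco/goals/validator.py | _criterion_satisfied
-- ===== SOURCE A (Python) =====
-- def _criterion_satisfied(criterion: str, results: dict[str, bool]) -> bool:
--     """Check if *criterion* is satisfied by any key in *results*."""
--     # Exact match first
--     if criterion in results:
--         return bool(results[criterion])
--     # Substring match
--     lower_crit = criterion.lower()
--     for key, val in results.items():
--         if lower_crit in key.lower() or key.lower() in lower_crit:
--             return bool(val)
--     return False
-- ===== SOURCE B (Python) =====
-- def _criterion_satisfied(criterion: str, results: dict[str, bool]) -> bool:
--     """Check if *criterion* is satisfied by any key in *results* (single pass)."""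
--     lower_crit = criterion.lower()
--     found_substr = False
--     substr_val = False
--     for key, val in results.items():
--         if key == criterion:
--             return bool(val)
--         if not found_substr and (lower_crit in key.lower() or key.lower() in lower_crit):
--             found_substr = True
--             substr_val = val
--     return bool(substr_val) if found_substr else False
-- ===== Notes on version B (the rewrite author's own statement) =====
-- stated objective: alternative
-- what changed: Replaces the dict membership test + separate substring loop with a single pass over the items that returns immediately on an exact key and records the first substring match in a found-flag/value pair, deciding after the loop.
import Mathlib
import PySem

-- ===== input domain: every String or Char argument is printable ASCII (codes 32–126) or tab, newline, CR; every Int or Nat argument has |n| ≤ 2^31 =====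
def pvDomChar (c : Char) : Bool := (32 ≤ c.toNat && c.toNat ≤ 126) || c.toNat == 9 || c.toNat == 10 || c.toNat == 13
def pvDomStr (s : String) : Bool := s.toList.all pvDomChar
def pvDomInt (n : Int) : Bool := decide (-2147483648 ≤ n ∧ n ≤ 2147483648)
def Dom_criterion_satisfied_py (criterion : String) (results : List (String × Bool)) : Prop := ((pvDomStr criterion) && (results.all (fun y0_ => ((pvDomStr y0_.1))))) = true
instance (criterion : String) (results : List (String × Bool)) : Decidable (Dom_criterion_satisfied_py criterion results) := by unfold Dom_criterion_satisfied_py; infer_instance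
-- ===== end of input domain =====

-- B merges A's exact-match dict lookup and separate substring loop into one pass with a
-- found-flag/value pair (alternative decomposition, same cost); return value only, no mutation.

-- ===== PORT A =====
-- the substring-match loop of A: first key whose lowering contains / is contained in lower_crit
def subLoopA (lower_crit : String) : List (String × Bool) → Bool
  | [] => false
  | (key, val) :: rest =>
    if PySem.Str.isIn lower_crit (PySem.Str.lower key)
        || PySem.Str.isIn (PySem.Str.lower key) lower_crit then val
    else subLoopA lower_crit rest

def criterion_satisfied_py (criterion : String) (results : List (String × Bool)) : Bool :=
  -- 'if criterion in results: return bool(results[criterion])' — first-match lookup on the assoc list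
  match results.find? (fun p => p.1 == criterion) with
  | some p => p.2
  | none => subLoopA (PySem.Str.lower criterion) results

-- ===== PORT B =====
-- B's single loop: exact key returns at once; the first substring match is recorded in
-- (found_substr, substr_val) and the scan continues
def altLoop (criterion lower_crit : String) :
    List (String × Bool) → Bool → Bool → Bool
  | [], found_substr, substr_val => if found_substr then substr_val else false
  | (key, val) :: rest, found_substr, substr_val =>
    if key == criterion then val
    else if !found_substr
        && (PySem.Str.isIn lower_crit (PySem.Str.lower key)
            || PySem.Str.isIn (PySem.Str.lower key) lower_crit) then
      altLoop criterion lower_crit rest true val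
    else
      altLoop criterion lower_crit rest found_substr substr_val

def criterion_satisfied_py_alt (criterion : String) (results : List (String × Bool)) : Bool :=
  altLoop criterion (PySem.Str.lower criterion) results false false

-- ===== PRECONDITION & SPEC =====
def Spec_criterion_satisfied_py (criterion : String) (results : List (String × Bool)) (out : Bool) : Prop := out = criterion_satisfied_py_alt criterion results
instance (criterion : String) (results : List (String × Bool)) (out : Bool) : Decidable (Spec_criterion_satisfied_py criterion results out) := by unfold Spec_criterion_satisfied_py; infer_instance

-- ===== CLAIM (what is proved, stated in full; the proofs are below) =====
def Claim_equal_criterion_satisfied_py : Prop := ∀ (criterion : String) (results : List (String × Bool)), Dom_criterion_satisfied_py criterion results → Spec_criterion_satisfied_py criterion results (criterion_satisfied_py criterion results)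

-- ===== LEMMAS AND PROOFS =====

-- if the list holds an exact match, B's loop returns the first one's value, whatever its state
theorem altLoop_find_some (criterion lower_crit : String) (rs : List (String × Bool))
    (p : String × Bool) (h : rs.find? (fun q => q.1 == criterion) = some p) :
    ∀ found sval, altLoop criterion lower_crit rs found sval = p.2 := by
  induction rs with
  | nil => simp at h
  | cons hd tl ih =>
    intro found sval
    cases hk : (hd.1 == criterion) with
    | true =>
      simp [List.find?, hk] at h
      subst h
      simp [altLoop, hk]
    | false =>
      simp [List.find?, hk] at h
      simp only [altLoop, hk, Bool.false_eq_true, if_false]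
      split
      · exact ih h true hd.2
      · exact ih h found sval

-- with no exact match and the flag already set, B's loop just returns the recorded value
theorem altLoop_found (criterion lower_crit : String) (rs : List (String × Bool))
    (h : rs.find? (fun q => q.1 == criterion) = none) :
    ∀ sval, altLoop criterion lower_crit rs true sval = sval := by
  induction rs with
  | nil => intro sval; simp [altLoop]
  | cons hd tl ih =>
    intro sval
    cases hk : (hd.1 == criterion) with
    | true => simp [List.find?, hk] at h
    | false =>
      simp only [List.find?, hk] at h
      simp only [altLoop, hk, Bool.false_eq_true, if_false, Bool.not_true, Bool.false_and]
      exact ih h sval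

-- with no exact match and the flag unset, B's loop computes A's substring loop
theorem altLoop_not_found (criterion lower_crit : String) (rs : List (String × Bool))
    (h : rs.find? (fun q => q.1 == criterion) = none) :
    ∀ sval, altLoop criterion lower_crit rs false sval = subLoopA lower_crit rs := by
  induction rs with
  | nil => intro sval; simp [altLoop, subLoopA]
  | cons hd tl ih =>
    intro sval
    cases hk : (hd.1 == criterion) with
    | true => simp [List.find?, hk] at h
    | false =>
      simp only [List.find?, hk] at h
      obtain ⟨k, v⟩ := hd
      simp only [] at hk
      simp only [altLoop, subLoopA, hk, Bool.false_eq_true, if_false, Bool.not_false,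
        Bool.true_and]
      split
      · exact altLoop_found criterion lower_crit tl h v
      · exact ih h sval

-- ===== VERDICT (by name: the statement is the Claim_ definition above) =====
theorem criterion_satisfied_py_spec : Claim_equal_criterion_satisfied_py := by
  intro criterion results _
  unfold Spec_criterion_satisfied_py criterion_satisfied_py criterion_satisfied_py_alt
  cases h : results.find? (fun p => p.1 == criterion) with
  | some p => exact (altLoop_find_some criterion _ results p h false false).symm
  | none => exact (altLoop_not_found criterion _ results h false).symm
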